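-- pv_equiv track=rewrite | github.com/Artemis21/toolkit | tools/dice.py | resolve_sw
-- ===== SOURCE A (Python) =====
-- def resolve_sw(results):
--     resolution = {
--         'successes': 0,
--         'triumphs': 0,
--         'despairs': 0,
--         'advantages': 0,
--         'light side': 0,
--         'dark side':0
--     }
--     for result in results:
--         if result == 'success':
--             resolution['successes'] += 1
--         elif result == 'advantage':
--             resolution['advantages'] += 1
--         elif result == 'triumph':
--             resolution['successes'] += 1
--             resolution['triumphs'] += 1
--         elif result == 'failure':
--             resolution['successes'] -= 1
--         elif result == 'threat':
--             resolution['advantages'] -= 1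
--         elif result == 'despair':
--             resolution['successes'] -= 1
--             resolution['despairs'] += 1
--         elif result == 'light side':
--             resolution['light side'] += 1
--         elif result == 'dark side':
--             resolution['dark side'] += 1
--     if resolution['successes'] < 0:
--         resolution['failures'] = resolution['successes'] * -1
--         del resolution['successes']
--     if resolution['advantages'] < 0:
--         resolution['threats'] = resolution['advantages'] * -1
--         del resolution['advantages']
--     return resolution
-- ===== SOURCE B (Python) =====
-- def resolve_sw(results):
--     # Count-then-derive: one count per token, fields computed in closed form,
--     # dict assembled directly in its final key order.
--     n = results.count
--     successes = n('success') + n('triumph') - n('failure') - n('despair')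
--     advantages = n('advantage') - n('threat')
--     res = {}
--     if successes >= 0:
--         res['successes'] = successes
--     res['triumphs'] = n('triumph')
--     res['despairs'] = n('despair')
--     if advantages >= 0:
--         res['advantages'] = advantages
--     res['light side'] = n('light side')
--     res['dark side'] = n('dark side')
--     if successes < 0:
--         res['failures'] = -successes
--     if advantages < 0:
--         res['threats'] = -advantages
--     return res
-- ===== Notes on version B (the rewrite author's own statement) =====
-- stated objective: simpler
-- what changed: Replaces the branch-per-element dict accumulation and post-hoc delete/reinsert with counting each of the eight tokens once, deriving every field in closed form, and assembling the dict directly in its final key order.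
import Mathlib
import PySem

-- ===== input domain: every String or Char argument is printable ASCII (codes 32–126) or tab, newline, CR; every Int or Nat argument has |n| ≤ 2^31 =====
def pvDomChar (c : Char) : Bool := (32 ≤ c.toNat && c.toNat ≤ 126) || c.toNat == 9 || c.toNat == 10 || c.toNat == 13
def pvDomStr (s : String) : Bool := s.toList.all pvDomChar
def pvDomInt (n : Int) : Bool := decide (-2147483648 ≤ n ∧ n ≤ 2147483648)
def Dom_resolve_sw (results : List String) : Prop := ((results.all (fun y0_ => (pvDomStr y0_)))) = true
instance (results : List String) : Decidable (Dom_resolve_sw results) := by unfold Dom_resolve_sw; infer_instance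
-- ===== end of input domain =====

-- B replaces A's branch-per-element dict accumulation by counting each token once and
-- deriving every field in closed form, assembling the dict directly in its final key order (objective: simpler).

-- ===== PORT A =====
-- loop body of A; `resolution[k] += 1` is modify (the key always exists in the dict)
def swStep (d : PySem.Dict String Int) (result : String) : PySem.Dict String Int :=
  if result == "success" then d.modify "successes" 0 (· + 1)
  else if result == "advantage" then d.modify "advantages" 0 (· + 1)
  else if result == "triumph" then (d.modify "successes" 0 (· + 1)).modify "triumphs" 0 (· + 1)
  else if result == "failure" then d.modify "successes" 0 (· - 1)
  else if result == "threat" then d.modify "advantages" 0 (· - 1)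
  else if result == "despair" then (d.modify "successes" 0 (· - 1)).modify "despairs" 0 (· + 1)
  else if result == "light side" then d.modify "light side" 0 (· + 1)
  else if result == "dark side" then d.modify "dark side" 0 (· + 1)
  else d

def resolve_sw (results : List String) : List (String × Int) :=
  let r0 : PySem.Dict String Int :=
    PySem.Dict.ofList [("successes",0),("triumphs",0),("despairs",0),("advantages",0),("light side",0),("dark side",0)]
  let r1 := results.foldl swStep r0
  let r2 := if r1.getD "successes" 0 < 0
            then (r1.insert "failures" (r1.getD "successes" 0 * -1)).erase "successes" else r1
  let r3 := if r2.getD "advantages" 0 < 0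
            then (r2.insert "threats" (r2.getD "advantages" 0 * -1)).erase "advantages" else r2
  r3.items

-- ===== PORT B =====
def resolve_sw_alt (results : List String) : List (String × Int) :=
  let n : String → Int := fun v => (PySem.List.count results v : Int)
  let successes := n "success" + n "triumph" - n "failure" - n "despair"
  let advantages := n "advantage" - n "threat"
  (if successes ≥ 0 then [("successes", successes)] else []) ++
  [("triumphs", n "triumph"), ("despairs", n "despair")] ++
  (if advantages ≥ 0 then [("advantages", advantages)] else []) ++
  [("light side", n "light side"), ("dark side", n "dark side")] ++
  (if successes < 0 then [("failures", -successes)] else []) ++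
  (if advantages < 0 then [("threats", -advantages)] else [])

-- ===== PRECONDITION & SPEC =====
def Spec_resolve_sw (results : List String) (out : List (String × Int)) : Prop := out = resolve_sw_alt results
instance (results : List String) (out : List (String × Int)) : Decidable (Spec_resolve_sw results out) := by unfold Spec_resolve_sw; infer_instance

-- ===== CLAIM (what is proved, stated in full; the proofs are below) =====
def Claim_equal_resolve_sw : Prop := ∀ (results : List String), Dom_resolve_sw results → Spec_resolve_sw results (resolve_sw results)

-- ===== LEMMAS AND PROOFS =====

-- the accumulation loop computes, in each slot, the initial value plus the closed-form count expression
lemma sw_loop (xs : List String) (s t de a li da : Int) :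
    xs.foldl swStep (PySem.Dict.mk [("successes",s),("triumphs",t),("despairs",de),("advantages",a),("light side",li),("dark side",da)])
    = PySem.Dict.mk
        [("successes", s + xs.count "success" + xs.count "triumph" - xs.count "failure" - xs.count "despair"),
         ("triumphs", t + xs.count "triumph"),
         ("despairs", de + xs.count "despair"),
         ("advantages", a + xs.count "advantage" - xs.count "threat"),
         ("light side", li + xs.count "light side"),
         ("dark side", da + xs.count "dark side")] := by
  induction xs generalizing s t de a li da with
  | nil => simp
  | cons x xs ih =>
    rw [List.foldl_cons]
    by_cases h1 : x = "success"
    · subst h1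
      rw [show swStep (PySem.Dict.mk [("successes",s),("triumphs",t),("despairs",de),("advantages",a),("light side",li),("dark side",da)]) "success"
            = PySem.Dict.mk [("successes",s+1),("triumphs",t),("despairs",de),("advantages",a),("light side",li),("dark side",da)] from rfl,
         ih]
      simp; ring
    by_cases h2 : x = "advantage"
    · subst h2
      rw [show swStep (PySem.Dict.mk [("successes",s),("triumphs",t),("despairs",de),("advantages",a),("light side",li),("dark side",da)]) "advantage"
            = PySem.Dict.mk [("successes",s),("triumphs",t),("despairs",de),("advantages",a+1),("light side",li),("dark side",da)] from rfl,
         ih]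
      simp; ring
    by_cases h3 : x = "triumph"
    · subst h3
      rw [show swStep (PySem.Dict.mk [("successes",s),("triumphs",t),("despairs",de),("advantages",a),("light side",li),("dark side",da)]) "triumph"
            = PySem.Dict.mk [("successes",s+1),("triumphs",t+1),("despairs",de),("advantages",a),("light side",li),("dark side",da)] from rfl,
         ih]
      simp; constructor <;> ring
    by_cases h4 : x = "failure"
    · subst h4
      rw [show swStep (PySem.Dict.mk [("successes",s),("triumphs",t),("despairs",de),("advantages",a),("light side",li),("dark side",da)]) "failure"
            = PySem.Dict.mk [("successes",s-1),("triumphs",t),("despairs",de),("advantages",a),("light side",li),("dark side",da)] from rfl,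
         ih]
      simp; ring
    by_cases h5 : x = "threat"
    · subst h5
      rw [show swStep (PySem.Dict.mk [("successes",s),("triumphs",t),("despairs",de),("advantages",a),("light side",li),("dark side",da)]) "threat"
            = PySem.Dict.mk [("successes",s),("triumphs",t),("despairs",de),("advantages",a-1),("light side",li),("dark side",da)] from rfl,
         ih]
      simp; ring
    by_cases h6 : x = "despair"
    · subst h6
      rw [show swStep (PySem.Dict.mk [("successes",s),("triumphs",t),("despairs",de),("advantages",a),("light side",li),("dark side",da)]) "despair"
            = PySem.Dict.mk [("successes",s-1),("triumphs",t),("despairs",de+1),("advantages",a),("light side",li),("dark side",da)] from rfl,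
         ih]
      simp; constructor <;> ring
    by_cases h7 : x = "light side"
    · subst h7
      rw [show swStep (PySem.Dict.mk [("successes",s),("triumphs",t),("despairs",de),("advantages",a),("light side",li),("dark side",da)]) "light side"
            = PySem.Dict.mk [("successes",s),("triumphs",t),("despairs",de),("advantages",a),("light side",li+1),("dark side",da)] from rfl,
         ih]
      simp; ring
    by_cases h8 : x = "dark side"
    · subst h8
      rw [show swStep (PySem.Dict.mk [("successes",s),("triumphs",t),("despairs",de),("advantages",a),("light side",li),("dark side",da)]) "dark side"
            = PySem.Dict.mk [("successes",s),("triumphs",t),("despairs",de),("advantages",a),("light side",li),("dark side",da+1)] from rfl,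
         ih]
      simp; ring
    · rw [show swStep (PySem.Dict.mk [("successes",s),("triumphs",t),("despairs",de),("advantages",a),("light side",li),("dark side",da)]) x
            = PySem.Dict.mk [("successes",s),("triumphs",t),("despairs",de),("advantages",a),("light side",li),("dark side",da)] from by
              simp [swStep, h1, h2, h3, h4, h5, h6, h7, h8],
         ih]
      simp [h1, h2, h3, h4, h5, h6, h7, h8]

-- ===== VERDICT (by name: the statement is the Claim_ definition above) =====
theorem resolve_sw_spec : Claim_equal_resolve_sw := by
  intro results _
  show resolve_sw results = resolve_sw_alt results
  simp only [resolve_sw]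
  rw [show (PySem.Dict.ofList [("successes",(0:Int)),("triumphs",0),("despairs",0),("advantages",0),("light side",0),("dark side",0)] : PySem.Dict String Int)
        = PySem.Dict.mk [("successes",0),("triumphs",0),("despairs",0),("advantages",0),("light side",0),("dark side",0)] from rfl,
      sw_loop]
  unfold resolve_sw_alt
  simp only [PySem.List.count, zero_add]
  by_cases hs : (results.count "success" : Int) + results.count "triumph" - results.count "failure" - results.count "despair" < 0 <;>
  by_cases ha : (results.count "advantage" : Int) - results.count "threat" < 0 <;>
    simp [hs, ha, PySem.Dict.getD, PySem.Dict.get?, PySem.Dict.insert,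
          PySem.Dict.erase, PySem.Dict.contains] <;>
    split_ifs <;> simp <;> omega
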